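-- pv_equiv track=rewrite | github.com/LGM-233/model | textrank/textrank_code.py | file_abstr
-- ===== SOURCE A (Python) =====
-- def file_abstr(index,doc):  #
--     doc_list = doc.split(',')
--     # split
--     step = 128
--     split_arrays = []
--     for i in range(0,len(doc_list),step):
--         if i + step < len(doc_list):
--             split_arrays.append(doc_list[i:i+step])
--         else:
--             split_arrays.append(doc_list[i:len(doc_list)])
--
--     doc_end = []
--
--     for i in range(len(split_arrays)):
--         if i in index:
--             doc_end.append(split_arrays[i])
--         else:
--             continue
--     # Use list derivation and join methods to combine integers into a string
--     result = ",".join(num for sublist in doc_end for num in sublist)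
--
--     return result
-- ===== SOURCE B (Python) =====
-- def file_abstr(index, doc):
--     # one element-level pass: element j of the comma-split doc belongs to chunk j // 128
--     return ",".join(num for j, num in enumerate(doc.split(',')) if j // 128 in index)
-- ===== Notes on version B (the rewrite author's own statement) =====
-- stated objective: simpler
-- what changed: Replaces the three-pass chunk-build/select/flatten structure with a single element-level filtering pass that keeps element j iff its block index j//128 is in the index set, joining directly.
import Mathlib
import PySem

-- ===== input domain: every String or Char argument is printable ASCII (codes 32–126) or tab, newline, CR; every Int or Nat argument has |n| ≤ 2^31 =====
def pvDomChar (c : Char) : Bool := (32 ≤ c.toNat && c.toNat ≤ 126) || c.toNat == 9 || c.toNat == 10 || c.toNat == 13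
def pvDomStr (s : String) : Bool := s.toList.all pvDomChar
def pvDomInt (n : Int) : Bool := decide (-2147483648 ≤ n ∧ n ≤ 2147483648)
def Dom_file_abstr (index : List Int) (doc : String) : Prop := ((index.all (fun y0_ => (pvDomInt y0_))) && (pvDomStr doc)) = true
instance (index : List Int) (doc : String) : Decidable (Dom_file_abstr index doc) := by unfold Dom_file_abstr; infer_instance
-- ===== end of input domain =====

-- B replaces A's chunk-build/select/flatten three-pass structure by one element-level
-- filtering pass keyed by the block index j // 128 (objective: simpler).

-- ===== PORT A =====
-- doc.split(',') has a non-empty separator, so PySem.Str.split? is always `some`; `.getD []` only unwraps it.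
def file_abstr (index : List Int) (doc : String) : String :=
  let doc_list : List String := (PySem.Str.split? doc ",").getD []
  let step : Int := 128
  let split_arrays : List (List String) :=
    (PySem.List.pyRange 0 doc_list.length step).foldl
      (fun acc i =>
        if i + step < (doc_list.length : Int) then
          acc ++ [PySem.List.slice doc_list (some i) (some (i + step))]
        else
          acc ++ [PySem.List.slice doc_list (some i) (some (doc_list.length : Int))]) []
  let doc_end : List (List String) :=
    (PySem.List.pyRange 0 split_arrays.length 1).foldl
      (fun acc i =>
        if index.contains i then acc ++ [PySem.List.pyGetD split_arrays i []] else acc) []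
  PySem.Str.join "," (doc_end.flatMap (fun sublist => sublist))

-- ===== PORT B =====
def file_abstr_alt (index : List Int) (doc : String) : String :=
  PySem.Str.join ","
    (((PySem.List.enumerate ((PySem.Str.split? doc ",").getD [])).filter
        (fun p => index.contains (PySem.Int.floordiv p.1 128))).map (fun p => p.2))

-- ===== PRECONDITION & SPEC =====
def Spec_file_abstr (index : List Int) (doc : String) (out : String) : Prop := out = file_abstr_alt index doc
instance (index : List Int) (doc : String) (out : String) : Decidable (Spec_file_abstr index doc out) := by unfold Spec_file_abstr; infer_instance

-- ===== CLAIM (what is proved, stated in full; the proofs are below) =====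
def Claim_equal_file_abstr : Prop := ∀ (index : List Int) (doc : String), Dom_file_abstr index doc → Spec_file_abstr index doc (file_abstr index doc)

-- ===== LEMMAS AND PROOFS =====

-- the size-128 chunks of a list, as A's first loop produces them
def pvChunks (L : List String) : List (List String) :=
  if h : L = [] then [] else L.take 128 :: pvChunks (L.drop 128)
termination_by L.length
decreasing_by
  simp only [List.length_drop]
  have : L.length ≠ 0 := fun h0 => h (List.eq_nil_of_length_eq_zero h0)
  omega

-- A's second loop, recursively: keep chunk number c iff c ∈ index
def pvChunkSel (index : List Int) : List (List String) → Int → List String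
  | [], _ => []
  | x :: xs, c => (if index.contains c then x else []) ++ pvChunkSel index xs (c + 1)

-- both of A's slice branches are (drop i).take 128
lemma pv_slice_eq (L : List String) (i : Int) (hi : 0 ≤ i) :
    (if i + 128 < (L.length : Int) then PySem.List.slice L (some i) (some (i + 128))
     else PySem.List.slice L (some i) (some (L.length : Int))) =
    (L.drop i.toNat).take 128 := by
  split_ifs with h
  · rw [PySem.List.slice_toNat L hi (by omega)]
    congr 1
    omega
  · rw [PySem.List.slice_toNat L hi (by positivity)]
    rw [List.take_of_length_le (by simp), List.take_of_length_le (by simp; omega)]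

lemma pv_range_chunks (n : Nat) (L : List String) (hn : L.length ≤ n) :
    (List.range ((L.length + 127) / 128)).map (fun k => (L.drop (128 * k)).take 128) = pvChunks L := by
  induction n generalizing L with
  | zero =>
    have : L = [] := List.eq_nil_of_length_eq_zero (by omega)
    subst this; simp [pvChunks]
  | succ n ih =>
    rcases eq_or_ne L [] with rfl | h
    · simp [pvChunks]
    · rw [pvChunks]; simp only [h, dite_false]
      have hlen : 1 ≤ L.length := List.length_pos_iff.mpr h
      have hc : (L.length + 127) / 128 = ((L.drop 128).length + 127) / 128 + 1 := by
        simp only [List.length_drop]; omega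
      rw [hc, List.range_succ_eq_map]
      simp only [List.map_cons, List.map_map, Nat.mul_zero, List.drop_zero]
      congr 1
      rw [← ih (L.drop 128) (by simp; omega)]
      apply List.map_congr_left
      intro k _
      simp only [Function.comp_apply, List.drop_drop]
      congr 2
      omega

-- A's first loop, rewritten through pyRange_of_pos, builds pvChunks
lemma pv_chunks_eq (L : List String) :
    (PySem.List.pyRange 0 (L.length : Int) 128).map (fun i => (L.drop i.toNat).take 128) =
    pvChunks L := by
  rw [PySem.List.pyRange_of_pos 0 (L.length : Int) (by norm_num), List.map_map]
  have hcnt : (if (0:Int) < (L.length : Int) then (((L.length : Int) - 0 + 128 - 1) / 128).toNat else 0)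
      = (L.length + 127) / 128 := by
    split_ifs with h' <;> omega
  rw [hcnt, ← pv_range_chunks L.length L le_rfl]
  apply List.map_congr_left
  intro k _
  simp only [Function.comp_apply]
  congr 2
  omega

-- A's selection flatMap over chunk indices is pvChunkSel
lemma pv_sel_eq (index : List Int) (cs : List (List String)) (c : Int) :
    (PySem.List.pyRange c (c + (cs.length : Int)) 1).flatMap
      (fun i => if index.contains i then PySem.List.pyGetD cs (i - c) [] else []) =
    pvChunkSel index cs c := by
  induction cs generalizing c with
  | nil =>
    simp [pvChunkSel, PySem.List.pyRange_of_pos c c (by norm_num : (0:Int) < 1)]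
  | cons x xs ih =>
    rw [PySem.List.pyRange_one_cons (by simp [List.length_cons])]
    rw [List.flatMap_cons]
    have h1 : (c + ((x :: xs).length : Int)) = (c + 1) + (xs.length : Int) := by
      simp [List.length_cons]; omega
    rw [pvChunkSel]
    congr 1
    · have h0 : PySem.List.pyGetD (x :: xs) (c - c) [] = x := by
        rw [show c - c = (0:Int) by omega, PySem.List.pyGetD_of_nonneg _ _ le_rfl]
        rfl
      rw [h0]
    · rw [h1, ← ih (c + 1)]
      apply List.flatMap_congr
      intro i hi
      have hb := PySem.List.mem_pyRange_one.mp hi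
      have hge : 0 ≤ i - (c + 1) := by omega
      rw [PySem.List.pyGetD_of_nonneg _ _ (by omega : 0 ≤ i - c),
          PySem.List.pyGetD_of_nonneg _ _ hge]
      have ht : (i - c).toNat = (i - (c + 1)).toNat + 1 := by omega
      rw [ht, List.getD_cons_succ]

-- chunk-level selection equals B's element-level filtering by block index
lemma pv_core (index : List Int) (n : Nat) (L : List String) (hn : L.length ≤ n)
    (c : Int) (hc : 0 ≤ c) :
    pvChunkSel index (pvChunks L) c =
    ((PySem.List.enumerate L (128 * c)).filter
        (fun p => index.contains (PySem.Int.floordiv p.1 128))).map (fun p => p.2) := by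
  induction n generalizing L c with
  | zero =>
    have : L = [] := List.eq_nil_of_length_eq_zero (by omega)
    subst this
    simp [pvChunks, pvChunkSel, PySem.List.enumerate]
  | succ n ih =>
    rcases eq_or_ne L [] with rfl | h
    · simp [pvChunks, pvChunkSel, PySem.List.enumerate]
    · rw [pvChunks]
      simp only [h, dite_false]
      rw [pvChunkSel]
      conv_rhs => rw [show L = L.take 128 ++ L.drop 128 from (List.take_append_drop 128 L).symm]
      rw [PySem.List.enumerate_append, List.filter_append, List.map_append]
      congr 1
      · -- the first 128 elements all have block index c
        have hfc : ∀ p ∈ PySem.List.enumerate (L.take 128) (128 * c),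
            (index.contains (PySem.Int.floordiv p.1 128)) = index.contains c := by
          intro p hp
          obtain ⟨k, hk, rfl⟩ := (PySem.List.mem_enumerate_iff _ _ _).mp hp
          have hk' : k < 128 := by
            have := List.length_take_le 128 L
            omega
          have : PySem.Int.floordiv (128 * c + (k : Int)) 128 = c := by
            rw [PySem.Int.floordiv_eq_iff_of_pos (by norm_num)]
            constructor
            · nlinarith [Int.natCast_nonneg k]
            · nlinarith [Int.natCast_nonneg k]
          rw [this]
        rw [List.filter_congr hfc]
        by_cases hm : index.contains c
        · simp only [hm, if_true, List.filter_true]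
          exact (PySem.List.map_snd_enumerate _ _).symm
        · have hcm : (c ∈ index) = False := by
            simp only [eq_iff_iff, iff_false]
            intro hmem
            exact hm (List.contains_iff_mem.mpr hmem)
          simp [hcm]
      · -- the tail starts at offset 128 * (c + 1)
        by_cases hlen : L.length ≤ 128
        · have hd : L.drop 128 = [] := List.drop_eq_nil_of_le hlen
          rw [hd]
          simp [pvChunks, pvChunkSel, PySem.List.enumerate]
        · have hl : (L.take 128).length = 128 := by simp; omega
          rw [hl]
          have hoff : 128 * c + ((128:Nat) : Int) = 128 * (c + 1) := by push_cast; ring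
          rw [hoff]
          exact ih (L.drop 128) (by simp; omega) (c + 1) (by omega)

lemma pv_flatMap_filter {α β : Type} (p : α → Bool) (f : α → List β) (l : List α) :
    (l.filter p).flatMap f = l.flatMap (fun x => if p x then f x else []) := by
  induction l with
  | nil => rfl
  | cons x xs ih =>
    by_cases h : p x <;> simp [h, ih]

-- assembled: A's whole pipeline produces B's filtered element list
lemma pv_main (index : List Int) (L : List String) :
    ((PySem.List.pyRange 0 (L.length : Int) 128).foldl
        (fun acc i =>
          if i + 128 < (L.length : Int) then
            acc ++ [PySem.List.slice L (some i) (some (i + 128))]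
          else
            acc ++ [PySem.List.slice L (some i) (some (L.length : Int))]) [] |>
      (fun split_arrays =>
        ((PySem.List.pyRange 0 (split_arrays.length : Int) 1).foldl
          (fun acc i =>
            if index.contains i then acc ++ [PySem.List.pyGetD split_arrays i []] else acc) []).flatMap
          (fun sublist => sublist))) =
    ((PySem.List.enumerate L).filter
        (fun p => index.contains (PySem.Int.floordiv p.1 128))).map (fun p => p.2) := by
  have hfold1 :
      (PySem.List.pyRange 0 (L.length : Int) 128).foldl
        (fun acc i =>
          if i + 128 < (L.length : Int) then
            acc ++ [PySem.List.slice L (some i) (some (i + 128))]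
          else
            acc ++ [PySem.List.slice L (some i) (some (L.length : Int))]) [] = pvChunks L := by
    have hbody : (fun (acc : List (List String)) (i : Int) =>
        if i + 128 < (L.length : Int) then
          acc ++ [PySem.List.slice L (some i) (some (i + 128))]
        else
          acc ++ [PySem.List.slice L (some i) (some (L.length : Int))]) =
        (fun acc i => acc ++ [if i + 128 < (L.length : Int) then
            PySem.List.slice L (some i) (some (i + 128))
          else PySem.List.slice L (some i) (some (L.length : Int))]) := by
      funext acc i
      split_ifs <;> rfl
    rw [hbody, PySem.List.foldl_append_eq_flatMap, List.nil_append]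
    rw [← pv_chunks_eq L]
    have hsing : ∀ (l : List Int) (f : Int → List String),
        l.flatMap (fun i => [f i]) = l.map f := by
      intro l f
      induction l with
      | nil => rfl
      | cons x xs ihl => simp [List.flatMap_cons, ihl]
    rw [hsing]
    apply List.map_congr_left
    intro i hi
    have hnn : 0 ≤ i := by
      obtain ⟨h1, -, -⟩ := (PySem.List.mem_pyRange_iff_of_pos (by norm_num) i).mp hi
      exact h1
    exact pv_slice_eq L i hnn
  simp only [hfold1]
  rw [PySem.List.foldl_append_if, List.nil_append]
  rw [List.flatMap_map, pv_flatMap_filter]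
  have h0 : (PySem.List.pyRange 0 ((pvChunks L).length : Int) 1).flatMap
      (fun i => if index.contains i then PySem.List.pyGetD (pvChunks L) i [] else []) =
      pvChunkSel index (pvChunks L) 0 := by
    rw [← pv_sel_eq index (pvChunks L) 0,
        show (0:Int) + ((pvChunks L).length : Int) = ((pvChunks L).length : Int) by omega]
    apply List.flatMap_congr
    intro i _
    rw [show i - (0:Int) = i by omega]
  rw [h0, pv_core index L.length L le_rfl 0 le_rfl]
  norm_num

-- ===== VERDICT (by name: the statement is the Claim_ definition above) =====
theorem file_abstr_spec : Claim_equal_file_abstr := by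
  intro index doc _
  unfold Spec_file_abstr file_abstr file_abstr_alt
  exact congrArg (PySem.Str.join ",") (pv_main index ((PySem.Str.split? doc ",").getD []))
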